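-- pv_equiv track=rewrite | github.com/JustyRodriguez/-LFP-Proyecto2_202100058 | LFP_Proyecto2_202100058/Proyecto 2_LFPB+_202100058/Proyecto 2 LFP.py | afd_numero
-- ===== SOURCE A (Python) =====
-- num = "0123456789"
--
-- moreOless = "+-"
--
-- def afd_numero(lexema):
--     pat = "[-+]?[0-9]+\.[0-9]+"
--     estado = 0
--     aceptacion = [2,4]
--
--     for char in lexema:
--         if estado == 0:
--             if char in moreOless:
--                 estado = 1
--             elif char in num:
--                 estado = 2
--             else:
--                 estado = -5
--         elif estado == 1:
--             if char in num:
--                 estado = 2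
--             else:
--                 estado = -5
--         elif estado == 2:
--             if char in num:
--                 estado = 2
--             elif char == ".":
--                 estado = 3
--             else:
--                 estado = -5
--         elif estado == 3:
--             if char in num:
--                 estado = 4
--             else:
--                 estado = -5
--         elif estado == 4:
--             if char in num:
--                 estado = 4
--             else:
--                 estado = -5
--
--     if estado in aceptacion:
--         return True
--     else:
--         return False
-- ===== SOURCE B (Python) =====
-- num = "0123456789"
--
-- def afd_numero(lexema):
--     s = lexema[1:] if lexema and lexema[0] in "+-" else lexema
--     i = s.find(".")
--     if i < 0:
--         return s != "" and all(c in num for c in s)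
--     ent, frac = s[:i], s[i + 1:]
--     return ent != "" and frac != "" and all(c in num for c in ent) and all(c in num for c in frac)
-- ===== Notes on version B (the rewrite author's own statement) =====
-- stated objective: simpler
-- what changed: Replaces the hand-coded 5-state DFA transition loop by stripping an optional sign, locating the first decimal point with str.find, and directly checking that the resulting integer/fraction pieces are non-empty digit strings.
import Mathlib
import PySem

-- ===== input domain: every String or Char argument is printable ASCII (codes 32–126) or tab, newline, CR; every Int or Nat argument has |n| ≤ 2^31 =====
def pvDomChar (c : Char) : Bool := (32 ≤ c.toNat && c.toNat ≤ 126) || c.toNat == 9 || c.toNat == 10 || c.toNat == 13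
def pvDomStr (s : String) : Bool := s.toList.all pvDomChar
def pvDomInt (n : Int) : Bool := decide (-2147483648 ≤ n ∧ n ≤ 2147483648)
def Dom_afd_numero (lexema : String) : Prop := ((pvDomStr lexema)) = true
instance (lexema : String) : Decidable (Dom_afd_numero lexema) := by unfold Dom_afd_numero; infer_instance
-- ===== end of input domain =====

-- B replaces A's hand-coded 5-state DFA loop by: strip an optional sign, find the first decimal point,
-- and check the integer/fraction pieces are non-empty digit strings (simpler; same O(n) cost).

-- ===== PORT A =====
def numChars : List Char := "0123456789".toList

def moreOless : List Char := "+-".toList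

-- the DFA transition of A's loop body (named helper for the inline branch chain)
def pasoA (estado : Int) (char : Char) : Int :=
  if estado = 0 then
    if moreOless.contains char then 1
    else if numChars.contains char then 2
    else -5
  else if estado = 1 then
    if numChars.contains char then 2 else -5
  else if estado = 2 then
    if numChars.contains char then 2
    else if char = '.' then 3
    else -5
  else if estado = 3 then
    if numChars.contains char then 4 else -5
  else if estado = 4 then
    if numChars.contains char then 4 else -5
  else estado

def afd_numero (lexema : String) : Bool :=
  let aceptacion : List Int := [2, 4]
  let estado : Int := lexema.toList.foldl pasoA 0
  if estado ∈ aceptacion then true else false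

-- ===== PORT B =====
def afd_numero_alt (lexema : String) : Bool :=
  let s : List Char :=
    match lexema.toList with
    | [] => []
    | c :: rest => if moreOless.contains c then rest else c :: rest
  let i : Int := PySem.Chars.find s ['.']
  if i < 0 then
    decide (s ≠ []) && s.all (fun c => numChars.contains c)
  else
    let ent := PySem.Chars.slice s none (some i)
    let frac := PySem.Chars.slice s (some (i + 1)) none
    decide (ent ≠ []) && decide (frac ≠ []) &&
      ent.all (fun c => numChars.contains c) && frac.all (fun c => numChars.contains c)

-- ===== PRECONDITION & SPEC =====
def Spec_afd_numero (lexema : String) (out : Bool) : Prop := out = afd_numero_alt lexema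
instance (lexema : String) (out : Bool) : Decidable (Spec_afd_numero lexema out) := by unfold Spec_afd_numero; infer_instance

-- ===== CLAIM (what is proved, stated in full; the proofs are below) =====
def Claim_equal_afd_numero : Prop := ∀ (lexema : String), Dom_afd_numero lexema → Spec_afd_numero lexema (afd_numero lexema)

-- ===== LEMMAS AND PROOFS =====

def isDig (c : Char) : Bool := numChars.contains c

def acceptA (e : Int) : Bool := e == 2 || e == 4

-- the language accepted from state 2 of A's DFA
def acc2 : List Char → Bool
  | [] => true
  | c :: l =>
    if isDig c then acc2 l
    else if c = '.' then decide (l ≠ []) && l.all isDig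
    else false

-- the language accepted from state 0 after the optional-sign step
def accD : List Char → Bool
  | [] => false
  | c :: l => isDig c && acc2 l

lemma foldl_pasoA_err (l : List Char) : l.foldl pasoA (-5) = -5 := by
  induction l with
  | nil => rfl
  | cons c l ih => simpa [pasoA] using ih

lemma accept_foldl_four (l : List Char) : acceptA (l.foldl pasoA 4) = l.all isDig := by
  induction l with
  | nil => rfl
  | cons c l ih =>
    by_cases hd : c ∈ numChars
    · rw [List.foldl_cons, show pasoA 4 c = 4 by simp [pasoA, hd]]
      simp [ih, isDig, hd]
    · rw [List.foldl_cons, show pasoA 4 c = -5 by simp [pasoA, hd]]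
      simp [foldl_pasoA_err, acceptA, isDig, hd]

lemma accept_foldl_three (l : List Char) :
    acceptA (l.foldl pasoA 3) = (decide (l ≠ []) && l.all isDig) := by
  cases l with
  | nil => rfl
  | cons c l =>
    by_cases hd : c ∈ numChars
    · rw [List.foldl_cons, show pasoA 3 c = 4 by simp [pasoA, hd]]
      simp [accept_foldl_four, isDig, hd]
    · rw [List.foldl_cons, show pasoA 3 c = -5 by simp [pasoA, hd]]
      simp [foldl_pasoA_err, acceptA, isDig, hd]

lemma accept_foldl_two (l : List Char) : acceptA (l.foldl pasoA 2) = acc2 l := by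
  induction l with
  | nil => rfl
  | cons c l ih =>
    by_cases hd : c ∈ numChars
    · rw [List.foldl_cons, show pasoA 2 c = 2 by simp [pasoA, hd]]
      simp [ih, acc2, isDig, hd]
    · have hdnum : '.' ∉ numChars := by decide
      by_cases hdot : c = '.'
      · rw [List.foldl_cons, show pasoA 2 c = 3 by simp [pasoA, hdot, hdnum]]
        simp [accept_foldl_three, acc2, isDig, hdot, hdnum]
      · rw [List.foldl_cons, show pasoA 2 c = -5 by simp [pasoA, hd, hdot]]
        simp [foldl_pasoA_err, acceptA, acc2, isDig, hd, hdot]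

lemma accept_foldl_one (l : List Char) : acceptA (l.foldl pasoA 1) = accD l := by
  cases l with
  | nil => rfl
  | cons c l =>
    by_cases hd : c ∈ numChars
    · rw [List.foldl_cons, show pasoA 1 c = 2 by simp [pasoA, hd]]
      simp [accept_foldl_two, accD, isDig, hd]
    · rw [List.foldl_cons, show pasoA 1 c = -5 by simp [pasoA, hd]]
      simp [foldl_pasoA_err, acceptA, accD, isDig, hd]

-- acc2 on a dot-free list is "all digits"
lemma acc2_no_dot (l : List Char) (h : '.' ∉ l) : acc2 l = l.all isDig := by
  induction l with
  | nil => rfl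
  | cons c l ih =>
    have hc : c ≠ '.' := by rintro rfl; exact h (List.mem_cons_self ..)
    have hl : '.' ∉ l := fun hm => h (List.mem_cons_of_mem _ hm)
    by_cases hd : isDig c
    · simp [acc2, hd, ih hl]
    · simp [acc2, hd, hc]

lemma acc2_split (p q : List Char) (h : '.' ∉ p) :
    acc2 (p ++ '.' :: q) = (p.all isDig && (decide (q ≠ []) && q.all isDig)) := by
  induction p with
  | nil =>
    have hdot : isDig '.' = false := by decide
    simp [acc2, hdot]
  | cons c p ih =>
    have hc : c ≠ '.' := by rintro rfl; exact h (List.mem_cons_self ..)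
    have hp : '.' ∉ p := fun hm => h (List.mem_cons_of_mem _ hm)
    by_cases hd : isDig c
    · simp [acc2, hd, ih hp]
    · simp [acc2, hd, hc]

lemma accD_split (p q : List Char) (h : '.' ∉ p) :
    accD (p ++ '.' :: q) =
      (decide (p ≠ []) && decide (q ≠ []) && p.all isDig && q.all isDig) := by
  cases p with
  | nil =>
    have hdot : isDig '.' = false := by decide
    simp [accD, hdot]
  | cons c p =>
    have hp : '.' ∉ p := fun hm => h (List.mem_cons_of_mem _ hm)
    simp only [List.cons_append, accD, acc2_split p q hp]
    cases hcd : isDig c <;> cases hpa : p.all isDig <;>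
      cases hqa : q.all isDig <;> simp [hcd, hpa]

lemma infix_dot_iff (s : List Char) : ['.'] <:+: s ↔ '.' ∈ s := by
  constructor
  · rintro ⟨u, v, rfl⟩; simp
  · intro hm
    obtain ⟨u, v, rfl⟩ := List.append_of_mem hm
    exact ⟨u, v, by simp⟩

-- B's branch body computed from accD
lemma accD_eq_bbody (s : List Char) :
    accD s =
      (if PySem.Chars.find s ['.'] < 0 then
         decide (s ≠ []) && s.all isDig
       else
         decide (PySem.Chars.slice s none (some (PySem.Chars.find s ['.'])) ≠ []) &&
         decide (PySem.Chars.slice s (some (PySem.Chars.find s ['.'] + 1)) none ≠ []) &&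
         (PySem.Chars.slice s none (some (PySem.Chars.find s ['.']))).all isDig &&
         (PySem.Chars.slice s (some (PySem.Chars.find s ['.'] + 1)) none).all isDig) := by
  by_cases hneg : PySem.Chars.find s ['.'] < 0
  · -- no dot in s
    have h1 : PySem.Chars.find s ['.'] = -1 :=
      le_antisymm (by omega) (PySem.Chars.neg_one_le_find s ['.'])
    have hnin : '.' ∉ s := by
      have := (PySem.Chars.find_eq_neg_one_iff s ['.']).mp h1
      exact fun hm => this ((infix_dot_iff s).mpr hm)
    rw [if_pos hneg]
    cases s with
    | nil => rfl
    | cons c l =>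
      have hl : '.' ∉ l := fun hm => hnin (List.mem_cons_of_mem _ hm)
      simp [accD, acc2_no_dot l hl]
  · -- the first dot is at index i
    set i := PySem.Chars.find s ['.'] with hi
    have h0 : 0 ≤ i := by omega
    have hinf : ['.'] <:+: s := (PySem.Chars.find_nonneg_iff s ['.']).mp h0
    obtain ⟨hpre, hmin⟩ := PySem.Chars.find_spec h0
    have hlen : i ≤ s.length := PySem.Chars.find_le_length s ['.']
    have hdrop : s.drop i.toNat = '.' :: s.drop (i.toNat + 1) := by
      obtain ⟨t, ht⟩ := hpre
      have hteq : t = (s.drop i.toNat).tail := by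
        rw [← ht]; rfl
      rw [← ht, hteq, List.tail_drop]
      rfl
    have hsplit : s = s.take i.toNat ++ '.' :: s.drop (i.toNat + 1) := by
      conv_lhs => rw [← List.take_append_drop i.toNat s]
      rw [hdrop]
    have hnin : '.' ∉ s.take i.toNat := by
      intro hm
      obtain ⟨j, hj, hget⟩ := List.mem_iff_getElem.mp hm
      have hjlt : j < i.toNat := lt_of_lt_of_le hj (by simp)
      have hjs : j < s.length := lt_of_lt_of_le hj (by simp [List.length_take])
      have : ['.'] <+: s.drop j := by
        rw [List.drop_eq_getElem_cons hjs]
        have : s[j] = '.' := by simpa [List.getElem_take] using hget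
        rw [this]
        exact ⟨s.drop (j + 1), rfl⟩
      exact hmin j hjlt this
    rw [if_neg hneg]
    rw [PySem.Chars.slice_eq_listSlice, PySem.Chars.slice_eq_listSlice,
      PySem.List.slice_to _ h0, PySem.List.slice_from _ (by omega : (0:Int) ≤ i + 1)]
    have htn : (i + 1).toNat = i.toNat + 1 := by omega
    rw [htn]
    conv_lhs => rw [hsplit]
    rw [accD_split _ _ hnin]

lemma acceptA_eq (lexema : String) :
    afd_numero lexema = acceptA (lexema.toList.foldl pasoA 0) := by
  unfold afd_numero acceptA
  set e := lexema.toList.foldl pasoA 0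
  by_cases h2 : e = 2
  · simp [h2]
  · by_cases h4 : e = 4
    · simp [h4]
    · simp [h2, h4]

lemma accept_foldl_zero (cs : List Char) :
    acceptA (cs.foldl pasoA 0) =
      accD (match cs with
            | [] => []
            | c :: rest => if moreOless.contains c then rest else c :: rest) := by
  cases cs with
  | nil => rfl
  | cons c l =>
    by_cases hs : c ∈ moreOless
    · rw [List.foldl_cons, show pasoA 0 c = 1 by simp [pasoA, hs]]
      simp [accept_foldl_one, hs]
    · by_cases hd : c ∈ numChars
      · rw [List.foldl_cons, show pasoA 0 c = 2 by simp [pasoA, hs, hd]]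
        simp [accept_foldl_two, accD, isDig, hs, hd]
      · rw [List.foldl_cons, show pasoA 0 c = -5 by simp [pasoA, hs, hd]]
        simp [foldl_pasoA_err, acceptA, accD, isDig, hs, hd]

-- ===== VERDICT (by name: the statement is the Claim_ definition above) =====
theorem afd_numero_spec : Claim_equal_afd_numero := by
  intro lexema _
  unfold Spec_afd_numero
  rw [acceptA_eq, accept_foldl_zero]
  unfold afd_numero_alt
  have hfun : (fun c => numChars.contains c) = isDig := by funext c; rfl
  simp only [hfun]
  exact accD_eq_bbody _
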